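-- pv_equiv track=rewrite | github.com/Nansoouu/x-translator-mvp | backend/core/srt_chunking.py | chunk_srt_content
-- ===== SOURCE A (Python) =====
-- from typing import List, Dict, Tuple
--
-- def parse_srt_to_blocks(srt_content: str) -> List[Dict[str, str]]:
--     """
--     Parse un contenu SRT en une liste de blocs.
--
--     Chaque bloc : {
--         "index": "1",
--         "timecode": "00:00:01,000 --> 00:00:03,000",
--         "text": "Bonjour tout le monde",
--     }
--     """
--     blocks = []
--     for raw_block in srt_content.strip().split("\n\n"):
--         lines = raw_block.strip().splitlines()
--         if len(lines) < 3:
--             continue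
--         blocks.append({
--             "index": lines[0].strip(),
--             "timecode": lines[1].strip(),
--             "text": "\n".join(lines[2:]).strip(),
--         })
--     return blocks
--
-- def blocks_to_srt(blocks: List[Dict[str, str]]) -> str:
--     """Reconstitue un SRT à partir de blocs."""
--     parts = []
--     for i, block in enumerate(blocks):
--         # On réindexe séquentiellement à partir de 1
--         parts.append(f"{i + 1}\n{block['timecode']}\n{block['text']}\n")
--     return "\n".join(parts)
--
-- def group_blocks_into_chunks(
--     blocks: List[Dict[str, str]],
--     max_chars: int = 6000,
--     max_blocks: int = 50,
-- ) -> List[List[Dict[str, str]]]: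
--     """
--     Groupe les blocs SRT en chunks respectant les limites de taille.
--
--     Stratégie :
--     - Ne jamais couper un bloc (garder l'intégralité).
--     - Cumuler les caractères jusqu'à dépasser max_chars OU max_blocks.
--     - Ne pas mélanger les blocs distants (garder l'ordre).
--     """
--     if not blocks:
--         return []
--
--     chunks = []
--     current_chunk = []
--     current_chars = 0
--
--     for block in blocks:
--         block_text = block.get("text", "")
--         block_len = len(block_text)
--
--         # Si ajouter ce bloc dépasse les limites ET que le chunk n'est pas vide
--         if (current_chars + block_len > max_chars or len(current_chunk) >= max_blocks) and current_chunk: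
--             chunks.append(current_chunk)
--             current_chunk = []
--             current_chars = 0
--
--         current_chunk.append(block)
--         current_chars += block_len
--
--     # Ajouter le dernier chunk
--     if current_chunk:
--         chunks.append(current_chunk)
--
--     return chunks
--
-- def chunk_srt_content(
--     srt_content: str,
--     max_chars: int = 6000,
--     max_blocks: int = 50,
-- ) -> Tuple[List[str], List[List[Dict[str, str]]]]:
--     """
--     Découpe un SRT en plusieurs chunks.
--
--     Retourne :
--         - liste des SRT chunkés (chaque chunk est un SRT complet)
--         - liste des blocs par chunk (pour debug)
--     """
--     blocks = parse_srt_to_blocks(srt_content)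
--     chunked_blocks = group_blocks_into_chunks(blocks, max_chars, max_blocks)
--
--     srt_chunks = []
--     for chunk in chunked_blocks:
--         srt_chunks.append(blocks_to_srt(chunk))
--
--     return srt_chunks, chunked_blocks
-- ===== SOURCE B (Python) =====
-- from typing import List, Dict, Tuple
--
-- def chunk_srt_content(
--     srt_content: str,
--     max_chars: int = 6000,
--     max_blocks: int = 50,
-- ) -> Tuple[List[str], List[List[Dict[str, str]]]]:
--     srt_chunks: List[str] = []
--     chunked_blocks: List[List[Dict[str, str]]] = []
--     cur_parts: List[str] = []
--     cur_blocks: List[Dict[str, str]] = []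
--     cur_chars = 0
--     for raw_block in srt_content.strip().split("\n\n"):
--         lines = raw_block.strip().splitlines()
--         if len(lines) < 3:
--             continue
--         timecode = lines[1].strip()
--         text = "\n".join(lines[2:]).strip()
--         block = {"index": lines[0].strip(), "timecode": timecode, "text": text}
--         if (cur_chars + len(text) > max_chars or len(cur_blocks) >= max_blocks) and cur_blocks:
--             srt_chunks.append("\n".join(cur_parts))
--             chunked_blocks.append(cur_blocks)
--             cur_parts, cur_blocks, cur_chars = [], [], 0
--         cur_parts.append(f"{len(cur_blocks) + 1}\n{timecode}\n{text}\n")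
--         cur_blocks.append(block)
--         cur_chars += len(text)
--     if cur_blocks:
--         srt_chunks.append("\n".join(cur_parts))
--         chunked_blocks.append(cur_blocks)
--     return srt_chunks, chunked_blocks
-- ===== Notes on version B (the rewrite author's own statement) =====
-- stated objective: alternative
-- what changed: A's three list-producing stages (parse all blocks, group them, then serialize each chunk) are fused into one single pass over the raw blocks that parses, applies the chunk-boundary test, and accumulates each chunk's reindexed serialized parts incrementally, flushing both result lists at chunk boundaries.
import Mathlib
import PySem

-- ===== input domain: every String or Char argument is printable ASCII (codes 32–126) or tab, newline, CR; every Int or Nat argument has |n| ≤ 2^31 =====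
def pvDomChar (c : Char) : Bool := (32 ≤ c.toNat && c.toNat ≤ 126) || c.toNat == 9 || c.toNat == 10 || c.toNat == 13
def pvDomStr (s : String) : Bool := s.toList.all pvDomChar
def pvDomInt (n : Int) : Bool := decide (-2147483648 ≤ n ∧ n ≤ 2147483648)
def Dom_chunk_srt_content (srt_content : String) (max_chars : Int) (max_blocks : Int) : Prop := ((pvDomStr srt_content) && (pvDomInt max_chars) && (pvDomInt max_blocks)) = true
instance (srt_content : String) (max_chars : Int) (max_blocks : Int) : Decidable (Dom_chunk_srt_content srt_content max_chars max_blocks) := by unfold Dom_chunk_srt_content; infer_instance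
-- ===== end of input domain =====

-- B fuses A's three stages (parse → group → serialize each chunk) into one pass over the raw
-- blocks that flushes each finished chunk's serialized text as it goes (objective: alternative).

-- ===== PORT A =====
-- the state of A's three loops, as named loop-body helpers (each is the literal Python loop body)

-- loop body of parse_srt_to_blocks; '\n\n' is a nonempty separator so split? below is always some;
-- in the else branch lines.length ≥ 3 so pyGet? 0 / pyGet? 1 are always some (the .getD "" are unreachable)
def pvParseStep (blocks : List (List (String × String))) (raw_block : String) : List (List (String × String)) :=
  let lines := PySem.Str.splitlines (PySem.Str.strip raw_block)
  if lines.length < 3 then blocks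
  else blocks ++ [[("index", PySem.Str.strip ((PySem.List.pyGet? lines 0).getD "")),
                   ("timecode", PySem.Str.strip ((PySem.List.pyGet? lines 1).getD "")),
                   ("text", PySem.Str.strip (PySem.Str.join "\n" (PySem.List.slice lines (some 2) none)))]]

def parse_srt_to_blocks (srt_content : String) : List (List (String × String)) :=
  ((PySem.Str.split? (PySem.Str.strip srt_content) "\n\n").getD []).foldl pvParseStep []

-- the f-string of blocks_to_srt's loop body; block['timecode'] / block['text'] always hit an
-- existing key on the dicts parse_srt_to_blocks builds, so the KeyError default "" is unreachable
def pvPart (p : Int × List (String × String)) : String :=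
  PySem.Int.toStr (p.1 + 1) ++ "\n" ++ (PySem.Dict.mk p.2).getD "timecode" "" ++ "\n"
    ++ (PySem.Dict.mk p.2).getD "text" "" ++ "\n"

def blocks_to_srt (blocks : List (List (String × String))) : String :=
  let parts := (PySem.List.enumerate blocks 0).foldl (fun parts p => parts ++ [pvPart p]) []
  PySem.Str.join "\n" parts

-- loop body of group_blocks_into_chunks; state is (chunks, current_chunk, current_chars)
def pvGroupStep (max_chars max_blocks : Int)
    (st : List (List (List (String × String))) × List (List (String × String)) × Int)
    (block : List (String × String)) :
    List (List (List (String × String))) × List (List (String × String)) × Int :=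
  let block_text := (PySem.Dict.mk block).getD "text" ""
  let block_len := PySem.Str.len block_text
  let st :=
    if (st.2.2 + block_len > max_chars ∨ (st.2.1.length : Int) ≥ max_blocks) ∧ st.2.1 ≠ [] then
      (st.1 ++ [st.2.1], ([] : List (List (String × String))), (0 : Int))
    else st
  (st.1, st.2.1 ++ [block], st.2.2 + block_len)

def group_blocks_into_chunks (blocks : List (List (String × String))) (max_chars : Int) (max_blocks : Int) :
    List (List (List (String × String))) :=
  if blocks = [] then []
  else
    let st := blocks.foldl (pvGroupStep max_chars max_blocks) ([], [], 0)
    if st.2.1 ≠ [] then st.1 ++ [st.2.1] else st.1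

def chunk_srt_content (srt_content : String) (max_chars : Int) (max_blocks : Int) :
    List String × (List (List (List (String × String)))) :=
  let blocks := parse_srt_to_blocks srt_content
  let chunked_blocks := group_blocks_into_chunks blocks max_chars max_blocks
  let srt_chunks := chunked_blocks.foldl (fun acc chunk => acc ++ [blocks_to_srt chunk]) []
  (srt_chunks, chunked_blocks)

-- ===== PORT B =====
-- loop body of B's single fused pass; state is (srt_chunks, chunked_blocks, cur_parts, cur_blocks, cur_chars)
def pvFusedStep (max_chars max_blocks : Int)
    (st : List String × List (List (List (String × String))) × List String ×
          List (List (String × String)) × Int)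
    (raw_block : String) :
    List String × List (List (List (String × String))) × List String ×
      List (List (String × String)) × Int :=
  let lines := PySem.Str.splitlines (PySem.Str.strip raw_block)
  if lines.length < 3 then st
  else
    let timecode := PySem.Str.strip ((PySem.List.pyGet? lines 1).getD "")
    let text := PySem.Str.strip (PySem.Str.join "\n" (PySem.List.slice lines (some 2) none))
    let block := [("index", PySem.Str.strip ((PySem.List.pyGet? lines 0).getD "")),
                  ("timecode", timecode), ("text", text)]
    let st :=
      if (st.2.2.2.2 + PySem.Str.len text > max_chars ∨ (st.2.2.2.1.length : Int) ≥ max_blocks)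
          ∧ st.2.2.2.1 ≠ [] then
        (st.1 ++ [PySem.Str.join "\n" st.2.2.1], st.2.1 ++ [st.2.2.2.1],
         ([] : List String), ([] : List (List (String × String))), (0 : Int))
      else st
    (st.1, st.2.1,
     st.2.2.1 ++ [PySem.Int.toStr ((st.2.2.2.1.length : Int) + 1) ++ "\n" ++ timecode ++ "\n" ++ text ++ "\n"],
     st.2.2.2.1 ++ [block], st.2.2.2.2 + PySem.Str.len text)

def chunk_srt_content_alt (srt_content : String) (max_chars : Int) (max_blocks : Int) :
    List String × (List (List (List (String × String)))) :=
  let st := ((PySem.Str.split? (PySem.Str.strip srt_content) "\n\n").getD []).foldl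
    (pvFusedStep max_chars max_blocks) ([], [], [], [], 0)
  if st.2.2.2.1 ≠ [] then
    (st.1 ++ [PySem.Str.join "\n" st.2.2.1], st.2.1 ++ [st.2.2.2.1])
  else (st.1, st.2.1)

-- ===== PRECONDITION & SPEC =====
def Spec_chunk_srt_content (srt_content : String) (max_chars : Int) (max_blocks : Int) (out : List String × (List (List (List (String × String))))) : Prop := out = chunk_srt_content_alt srt_content max_chars max_blocks
instance (srt_content : String) (max_chars : Int) (max_blocks : Int) (out : List String × (List (List (List (String × String))))) : Decidable (Spec_chunk_srt_content srt_content max_chars max_blocks out) := by unfold Spec_chunk_srt_content; infer_instance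

-- ===== CLAIM (what is proved, stated in full; the proofs are below) =====
def Claim_equal_chunk_srt_content : Prop := ∀ (srt_content : String) (max_chars : Int) (max_blocks : Int), Dom_chunk_srt_content srt_content max_chars max_blocks → Spec_chunk_srt_content srt_content max_chars max_blocks (chunk_srt_content srt_content max_chars max_blocks)

-- ===== LEMMAS AND PROOFS =====

-- parsing one raw block, as an Option
def pvParse? (raw_block : String) : Option (List (String × String)) :=
  let lines := PySem.Str.splitlines (PySem.Str.strip raw_block)
  if lines.length < 3 then none
  else some [("index", PySem.Str.strip ((PySem.List.pyGet? lines 0).getD "")),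
             ("timecode", PySem.Str.strip ((PySem.List.pyGet? lines 1).getD "")),
             ("text", PySem.Str.strip (PySem.Str.join "\n" (PySem.List.slice lines (some 2) none)))]

-- the serialized parts of one chunk, and its serialization
def pvParts (blocks : List (List (String × String))) : List String :=
  (PySem.List.enumerate blocks 0).map pvPart

def pvSer (blocks : List (List (String × String))) : String :=
  PySem.Str.join "\n" (pvParts blocks)
theorem pv_foldl_snoc {α β : Type} (f : α → β) (l : List α) (acc : List β) :
    l.foldl (fun a x => a ++ [f x]) acc = acc ++ l.map f := by
  induction l generalizing acc with
  | nil => simp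
  | cons h t ih => simp [ih]

theorem pvParseStep_none (raw : String) (hb : pvParse? raw = none)
    (acc : List (List (String × String))) : pvParseStep acc raw = acc := by
  unfold pvParse? at hb
  unfold pvParseStep
  by_cases hl : (PySem.Str.splitlines (PySem.Str.strip raw)).length < 3
  · simp only [hl, ite_true]
  · simp only [hl, ite_false] at hb
    cases hb

theorem pvParseStep_some (raw : String) (b : List (String × String))
    (hb : pvParse? raw = some b)
    (acc : List (List (String × String))) : pvParseStep acc raw = acc ++ [b] := by
  unfold pvParse? at hb
  unfold pvParseStep
  by_cases hl : (PySem.Str.splitlines (PySem.Str.strip raw)).length < 3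
  · simp only [hl, ite_true] at hb; cases hb
  · simp only [hl, ite_false, Option.some.injEq] at hb
    simp only [hl, ite_false, hb]

theorem pv_parse_foldl (l : List String) (acc : List (List (String × String))) :
    l.foldl pvParseStep acc = acc ++ l.filterMap pvParse? := by
  induction l generalizing acc with
  | nil => simp
  | cons r t ih =>
    simp only [List.foldl_cons, List.filterMap_cons]
    cases hb : pvParse? r with
    | none => rw [pvParseStep_none r hb, ih]
    | some b => rw [pvParseStep_some r b hb, ih, List.append_assoc]; rfl
theorem pvParts_nil : pvParts [] = [] := by
  simp [pvParts, PySem.List.enumerate]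

theorem pv_blocks_to_srt_eq (c : List (List (String × String))) :
    blocks_to_srt c = pvSer c := by
  unfold blocks_to_srt pvSer pvParts
  rw [pv_foldl_snoc]
  simp

theorem pv_parts_snoc (c : List (List (String × String))) (b : List (String × String)) :
    pvParts (c ++ [b]) = pvParts c ++ [pvPart ((c.length : Int), b)] := by
  unfold pvParts
  rw [PySem.List.enumerate_append]
  simp [PySem.List.enumerate]

theorem pv_part_eq (i t x : String) (n : Int) :
    pvPart (n, [("index", i), ("timecode", t), ("text", x)])
      = PySem.Int.toStr (n + 1) ++ "\n" ++ t ++ "\n" ++ x ++ "\n" := by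
  simp [pvPart, PySem.Dict.getD, PySem.Dict.get?_mk_cons]

theorem pv_getD_text (i t x : String) :
    (PySem.Dict.mk [("index", i), ("timecode", t), ("text", x)]).getD "text" "" = x := by
  simp [PySem.Dict.getD, PySem.Dict.get?_mk_cons]
theorem pvParts_singleton (b : List (String × String)) :
    pvParts [b] = [pvPart ((0 : Int), b)] := by
  simp [pvParts, PySem.List.enumerate]

theorem pv_step_inv (max_chars max_blocks : Int) (raw : String) (b : List (String × String))
    (hb : pvParse? raw = some b)
    (chk : List (List (List (String × String)))) (cur : List (List (String × String))) (chars : Int) :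
    pvFusedStep max_chars max_blocks (chk.map pvSer, chk, pvParts cur, cur, chars) raw
      = (let st := pvGroupStep max_chars max_blocks (chk, cur, chars) b
         (st.1.map pvSer, st.1, pvParts st.2.1, st.2.1, st.2.2)) := by
  unfold pvParse? at hb
  by_cases hl : (PySem.Str.splitlines (PySem.Str.strip raw)).length < 3
  · simp only [hl, ite_true] at hb; cases hb
  · simp only [hl, ite_false, Option.some.injEq] at hb
    subst hb
    unfold pvFusedStep pvGroupStep
    simp only [hl, ite_false, pv_getD_text]
    split_ifs with hc
    · simp only [Prod.mk.injEq, List.map_append, List.map_cons, List.map_nil, List.nil_append,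
        List.length_nil, Nat.cast_zero, pvParts_singleton, pv_part_eq]
      exact ⟨rfl, trivial⟩
    · simp only [pv_parts_snoc, pv_part_eq]

theorem pv_step_skip (max_chars max_blocks : Int) (raw : String) (hb : pvParse? raw = none)
    (st : List String × List (List (List (String × String))) × List String ×
          List (List (String × String)) × Int) :
    pvFusedStep max_chars max_blocks st raw = st := by
  unfold pvParse? at hb
  unfold pvFusedStep
  by_cases hl : (PySem.Str.splitlines (PySem.Str.strip raw)).length < 3
  · simp only [hl, ite_true]
  · simp only [hl, ite_false] at hb; cases hb
theorem pv_fold_inv (max_chars max_blocks : Int) (raws : List String) :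
    ∀ (chk : List (List (List (String × String)))) (cur : List (List (String × String))) (chars : Int),
    raws.foldl (pvFusedStep max_chars max_blocks) (chk.map pvSer, chk, pvParts cur, cur, chars)
      = (let st := (raws.filterMap pvParse?).foldl (pvGroupStep max_chars max_blocks) (chk, cur, chars)
         (st.1.map pvSer, st.1, pvParts st.2.1, st.2.1, st.2.2)) := by
  induction raws with
  | nil => intro chk cur chars; rfl
  | cons r t ih =>
    intro chk cur chars
    simp only [List.foldl_cons, List.filterMap_cons]
    cases hb : pvParse? r with
    | none => rw [pv_step_skip max_chars max_blocks r hb, ih]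
    | some b =>
      rw [pv_step_inv max_chars max_blocks r b hb]
      simp only [List.foldl_cons]
      exact ih _ _ _
-- ===== VERDICT (by name: the statement is the Claim_ definition above) =====
theorem chunk_srt_content_spec : Claim_equal_chunk_srt_content := by
  intro s mc mb _hdom
  unfold Spec_chunk_srt_content chunk_srt_content chunk_srt_content_alt group_blocks_into_chunks
    parse_srt_to_blocks
  generalize ((PySem.Str.split? (PySem.Str.strip s) "\n\n").getD []) = raws
  rw [pv_parse_foldl]
  simp only [List.nil_append]
  have hmain := pv_fold_inv mc mb raws [] [] 0
  simp only [pvParts_nil, List.map_nil] at hmain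
  rw [hmain]
  rw [pv_foldl_snoc]
  cases hB : raws.filterMap pvParse? with
  | nil => simp
  | cons b bs =>
    simp only [reduceCtorEq, ite_false]
    generalize (b :: bs).foldl (pvGroupStep mc mb) ([], [], 0) = F
    obtain ⟨F1, F2, F3⟩ := F
    by_cases hcur : F2 ≠ []
    · simp [hcur, pv_blocks_to_srt_eq, pvSer]
    · simp [hcur, pv_blocks_to_srt_eq, pvSer]
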